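-- pv_equiv track=rewrite | github.com/ramonserranoprofile/coder_byte | coderbyte/hard/blackjack_highest.py | BlackjackHighest
-- ===== SOURCE A (Python) =====
-- def BlackjackHighest(strArr):
--     # code goes here
--     values_blackjack = {
--         "two": 2,
--         "three": 3,
--         "four": 4,
--         "five": 5,
--         "six": 6,
--         "seven": 7,
--         "eight": 8,
--         "nine": 9,
--         "ten": 10,
--         "jack": 10,
--         "queen": 10,
--         "king": 10,
--         "ace": 11,
--     }
--
--     positioning_card = {
--         "two": 2,
--         "three": 3,
--         "four": 4,
--         "five": 5,
--         "six": 6,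
--         "seven": 7,
--         "eight": 8,
--         "nine": 9,
--         "ten": 10,
--         "jack": 11,
--         "queen": 12,
--         "king": 13,
--         "ace": 1,
--     }
--
--     sum_val = 0
--     highest_card_val = 0
--     highest_card = ""
--
--     for card in strArr:
--         sum_val += values_blackjack[card]
--
--         if positioning_card[card] > highest_card_val:
--             highest_card_val = positioning_card[card]
--             highest_card = card
--
--     as_is_one = False
--     if "ace" in strArr:
--         if sum_val > 21:
--             as_is_one = True
--         else:
--             highest_card = "ace"
--
--     if as_is_one:
--         sum_val -= 10
--
--     if sum_val > 21:
--         return "above {}".format(highest_card)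
--     elif sum_val == 21:
--         return "blackjack {}".format(highest_card)
--     else:
--         return "below {}".format(highest_card)
-- ===== SOURCE B (Python) =====
-- def BlackjackHighest(strArr):
--     values_blackjack = {
--         "two": 2, "three": 3, "four": 4, "five": 5, "six": 6, "seven": 7,
--         "eight": 8, "nine": 9, "ten": 10, "jack": 10, "queen": 10,
--         "king": 10, "ace": 11,
--     }
--     # the 13 card names sorted by descending blackjack rank (ace ranks lowest here)
--     rank_desc = ["king", "queen", "jack", "ten", "nine", "eight", "seven",
--                  "six", "five", "four", "three", "two", "ace"]
--     # count the hand once, then work on the fixed 13-name table: the sum comes from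
--     # per-name multiplicities, and since ranks are distinct per name (ties only happen
--     # between equal strings) the highest card is simply the first name of the
--     # descending rank table that occurs in the hand.
--     counts = {}
--     for card in strArr:
--         counts[card] = counts.get(card, 0) + 1
--     sum_val = sum(cnt * values_blackjack[name] for name, cnt in counts.items())
--     highest_card = next((name for name in rank_desc if name in counts), "")
--     if "ace" in counts:
--         if sum_val > 21:
--             sum_val -= 10
--         else:
--             highest_card = "ace"
--     if sum_val > 21:
--         return "above {}".format(highest_card)
--     if sum_val == 21:
--         return "blackjack {}".format(highest_card)
--     return "below {}".format(highest_card)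
-- ===== Notes on version B (the rewrite author's own statement) =====
-- stated objective: alternative
-- what changed: A's fused loop over the hand with a running strict maximum is replaced by a counting pass (a multiplicity dict) followed by table-driven computations: the sum is assembled from per-name counts, and the highest card is the first name of a fixed descending-rank table present in the hand, correct because ranks are injective on names so A's tie-break is vacuous.
import Mathlib
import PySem

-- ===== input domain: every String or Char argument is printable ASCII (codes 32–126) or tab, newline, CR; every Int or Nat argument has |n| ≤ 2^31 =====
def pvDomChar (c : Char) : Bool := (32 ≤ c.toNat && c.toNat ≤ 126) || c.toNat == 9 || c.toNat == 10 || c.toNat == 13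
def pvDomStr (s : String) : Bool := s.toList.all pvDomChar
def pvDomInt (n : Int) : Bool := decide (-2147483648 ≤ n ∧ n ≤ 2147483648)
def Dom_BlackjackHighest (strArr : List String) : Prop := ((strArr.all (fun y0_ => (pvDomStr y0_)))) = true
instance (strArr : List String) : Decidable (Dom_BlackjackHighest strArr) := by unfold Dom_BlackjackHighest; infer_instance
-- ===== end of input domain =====

-- B replaces A's fused loop (running strict maximum over the hand) by a table-driven
-- computation over the fixed 13-name card table: sum from per-name multiplicities,
-- highest card = first name of a descending-rank table present in the hand; objective: alternative.

-- shared module constants (the dict literals of the Python sources)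
def valuesBlackjack : PySem.Dict String Int :=
  PySem.Dict.ofList [("two", 2), ("three", 3), ("four", 4), ("five", 5), ("six", 6),
    ("seven", 7), ("eight", 8), ("nine", 9), ("ten", 10), ("jack", 10), ("queen", 10),
    ("king", 10), ("ace", 11)]

def positioningCard : PySem.Dict String Int :=
  PySem.Dict.ofList [("two", 2), ("three", 3), ("four", 4), ("five", 5), ("six", 6),
    ("seven", 7), ("eight", 8), ("nine", 9), ("ten", 10), ("jack", 11), ("queen", 12),
    ("king", 13), ("ace", 1)]

def cardNames : List String :=
  ["two", "three", "four", "five", "six", "seven", "eight", "nine", "ten",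
   "jack", "queen", "king", "ace"]

-- total lookups; under Pre_ every card is a key, so the default 0 is never read (Python raises KeyError there)
def pvVal (c : String) : Int := valuesBlackjack.getD c 0
def pvPos (c : String) : Int := positioningCard.getD c 0

-- ===== PORT A =====
-- the body of A's single for-loop (sum update and strict-> running-max update)
def pvStepA (acc : Int × Int × String) (card : String) : Int × Int × String :=
  (acc.1 + pvVal card,
   if pvPos card > acc.2.1 then (pvPos card, card) else (acc.2.1, acc.2.2))

def BlackjackHighest (strArr : List String) : String :=
  let st := strArr.foldl pvStepA ((0 : Int), (0 : Int), "")
  let sumVal0 := st.1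
  let highestCard0 := st.2.2
  let asIsOne : Bool :=
    if "ace" ∈ strArr then (if sumVal0 > 21 then true else false) else false
  let highestCard :=
    if "ace" ∈ strArr then (if sumVal0 > 21 then highestCard0 else "ace") else highestCard0
  let sumVal := if asIsOne then sumVal0 - 10 else sumVal0
  if sumVal > 21 then "above " ++ highestCard
  else if sumVal = 21 then "blackjack " ++ highestCard
  else "below " ++ highestCard

-- ===== PORT B =====
-- the 13 card names of Source B sorted by descending rank
def rankDesc : List String :=
  ["king", "queen", "jack", "ten", "nine", "eight", "seven",
   "six", "five", "four", "three", "two", "ace"]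

def BlackjackHighest_alt (strArr : List String) : String :=
  -- counts = {}; for card in strArr: counts[card] = counts.get(card, 0) + 1
  let counts : PySem.Dict String Int :=
    strArr.foldl (fun d x => d.insert x (d.getD x 0 + 1)) PySem.Dict.empty
  -- sum(cnt * values_blackjack[name] for name, cnt in counts.items())
  let sumVal0 : Int := (counts.items.map (fun p => p.2 * pvVal p.1)).sum
  -- next((name for name in rank_desc if name in counts), "")
  let highest0 : String := (rankDesc.find? (fun n => counts.contains n)).getD ""
  let sumVal : Int :=
    if counts.contains "ace" then (if sumVal0 > 21 then sumVal0 - 10 else sumVal0) else sumVal0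
  let highestCard : String :=
    if counts.contains "ace" then (if sumVal0 > 21 then highest0 else "ace") else highest0
  if sumVal > 21 then "above " ++ highestCard
  else if sumVal = 21 then "blackjack " ++ highestCard
  else "below " ++ highestCard

-- ===== PRECONDITION & SPEC =====
-- Pre_ excludes exactly the lists containing a string that is not one of the 13 card
-- names: Python A raises KeyError on the dict lookup there.
def Pre_BlackjackHighest (strArr : List String) : Prop := ∀ c ∈ strArr, c ∈ cardNames
instance (strArr : List String) : Decidable (Pre_BlackjackHighest strArr) := by
  unfold Pre_BlackjackHighest; infer_instance

def pvWitness_BlackjackHighest : List String := ["ace", "king", "three"]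

def Spec_BlackjackHighest (strArr : List String) (out : String) : Prop := out = BlackjackHighest_alt strArr
instance (strArr : List String) (out : String) : Decidable (Spec_BlackjackHighest strArr out) := by unfold Spec_BlackjackHighest; infer_instance

-- ===== CLAIM =====
def Claim_equal_BlackjackHighest : Prop := ∀ (strArr : List String), Dom_BlackjackHighest strArr → Pre_BlackjackHighest strArr → Spec_BlackjackHighest strArr (BlackjackHighest strArr)

-- ===== LEMMAS AND PROOFS =====

-- the running-max component of A's loop
def pvStepMax (p : Int × String) (c : String) : Int × String :=
  if pvPos c > p.1 then (pvPos c, c) else p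

lemma pvStepA_split (acc : Int × Int × String) (c : String) :
    pvStepA acc c = (acc.1 + pvVal c, pvStepMax (acc.2.1, acc.2.2) c) := by
  simp [pvStepA, pvStepMax]

lemma pv_fuse (l : List String) : ∀ (s hv : Int) (hc : String),
    l.foldl pvStepA (s, hv, hc) =
      (s + (l.map pvVal).sum, l.foldl pvStepMax (hv, hc)) := by
  induction l with
  | nil => intro s hv hc; simp
  | cons c t ih =>
    intro s hv hc
    simp only [List.foldl_cons, pvStepA_split, List.map_cons, List.sum_cons]
    rw [ih]
    ring_nf

lemma pv_pos_pos {c : String} (h : c ∈ cardNames) : 0 < pvPos c := by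
  simp [cardNames] at h
  rcases h with rfl | rfl | rfl | rfl | rfl | rfl | rfl | rfl | rfl | rfl | rfl | rfl | rfl <;> decide

lemma pv_pos_inj {a b : String} (ha : a ∈ cardNames) (hb : b ∈ cardNames)
    (h : pvPos a = pvPos b) : a = b := by
  simp [cardNames] at ha hb
  rcases ha with rfl | rfl | rfl | rfl | rfl | rfl | rfl | rfl | rfl | rfl | rfl | rfl | rfl <;>
    rcases hb with rfl | rfl | rfl | rfl | rfl | rfl | rfl | rfl | rfl | rfl | rfl | rfl | rfl <;>
      first | rfl | (exfalso; revert h; decide)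

lemma pv_names_rank {c : String} (h : c ∈ cardNames) : c ∈ rankDesc := by
  simp [cardNames] at h
  rcases h with rfl | rfl | rfl | rfl | rfl | rfl | rfl | rfl | rfl | rfl | rfl | rfl | rfl <;> decide

-- invariant of A's running-max fold
lemma pv_max_inv (l : List String) : ∀ (v : Int) (c : String), v = pvPos c →
    (l.foldl pvStepMax (v, c)).1 = pvPos (l.foldl pvStepMax (v, c)).2 ∧
    ((l.foldl pvStepMax (v, c)).2 = c ∨ (l.foldl pvStepMax (v, c)).2 ∈ l) ∧
    v ≤ (l.foldl pvStepMax (v, c)).1 ∧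
    ∀ x ∈ l, pvPos x ≤ (l.foldl pvStepMax (v, c)).1 := by
  induction l with
  | nil => intro v c hv; simp [hv]
  | cons a t ih =>
    intro v c hv
    simp only [List.foldl_cons, pvStepMax]
    by_cases h : pvPos a > v
    · simp only [h, if_pos]
      obtain ⟨h1, h2, h3, h4⟩ := ih (pvPos a) a rfl
      refine ⟨h1, ?_, by omega, ?_⟩
      · rcases h2 with h2 | h2 <;> simp [h2]
      · intro x hx
        rcases List.mem_cons.mp hx with rfl | hx
        · omega
        · exact h4 x hx
    · simp only [h, if_false]
      obtain ⟨h1, h2, h3, h4⟩ := ih v c hv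
      refine ⟨h1, ?_, h3, ?_⟩
      · rcases h2 with h2 | h2 <;> simp [h2]
      · intro x hx
        rcases List.mem_cons.mp hx with rfl | hx
        · omega
        · exact h4 x hx

-- B's table scan: first name of a strictly-descending rank table that occurs in l
lemma pv_find_spec : ∀ (r : List String), r.Pairwise (fun a b => pvPos b < pvPos a) →
    ∀ (l : List String), (∀ x ∈ l, x ∈ r) → l ≠ [] →
    ∃ n, r.find? (fun m => l.contains m) = some n ∧ n ∈ l ∧ ∀ x ∈ l, pvPos x ≤ pvPos n := by
  intro r
  induction r with
  | nil =>
    intro _ l hsub hne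
    cases l with
    | nil => exact absurd rfl hne
    | cons a t => exact absurd (hsub a (by simp)) (by simp)
  | cons a r' ih =>
    intro hp l hsub hne
    by_cases hmem : a ∈ l
    · refine ⟨a, ?_, hmem, ?_⟩
      · simp [hmem]
      · intro x hx
        rcases List.mem_cons.mp (hsub x hx) with rfl | hx'
        · exact le_refl _
        · have := (List.pairwise_cons.mp hp).1 x hx'
          omega
    · have hsub' : ∀ x ∈ l, x ∈ r' := by
        intro x hx
        rcases List.mem_cons.mp (hsub x hx) with rfl | hx'
        · exact absurd hx hmem
        · exact hx'
      obtain ⟨n, hn1, hn2, hn3⟩ := ih (List.pairwise_cons.mp hp).2 l hsub' hne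
      refine ⟨n, ?_, hn2, hn3⟩
      simp only [List.find?_cons, List.contains_eq_mem]
      simp only [hmem, decide_false]
      simpa using hn1

lemma pv_rank_sorted : rankDesc.Pairwise (fun a b => pvPos b < pvPos a) := by decide

-- indicator sum over a duplicate-free list
lemma pv_indicator (S : List String) (hnd : S.Nodup) (a : String) (ha : a ∈ S) :
    (S.map (fun n => ((if n = a then 1 else 0 : Int)) * pvVal n)).sum = pvVal a := by
  induction S with
  | nil => simp at ha
  | cons b S' ih =>
    simp only [List.map_cons, List.sum_cons]
    rcases List.mem_cons.mp ha with rfl | ha'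
    · have hnb : a ∉ S' := (List.nodup_cons.mp hnd).1
      have hz : (S'.map (fun n => ((if n = a then 1 else 0 : Int)) * pvVal n)).sum = 0 := by
        apply List.sum_eq_zero
        intro x hx
        obtain ⟨n, hn, rfl⟩ := List.mem_map.mp hx
        have : n ≠ a := fun h => hnb (h ▸ hn)
        simp [this]
      rw [if_pos rfl, one_mul, hz, add_zero]
    · have hab : b ≠ a := fun h => (List.nodup_cons.mp hnd).1 (h ▸ ha')
      rw [if_neg hab, zero_mul, zero_add, ih (List.nodup_cons.mp hnd).2 ha']

-- multiplicity sum over any duplicate-free table covering the hand = direct sum over the hand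
lemma pv_sum_counts (S : List String) (hnd : S.Nodup) (l : List String)
    (hsub : ∀ x ∈ l, x ∈ S) :
    (S.map (fun n => (l.count n : Int) * pvVal n)).sum = (l.map pvVal).sum := by
  induction l with
  | nil => simp
  | cons a t ih =>
    have ha := hsub a (by simp)
    have hsub' : ∀ x ∈ t, x ∈ S := fun x hx => hsub x (by simp [hx])
    calc (S.map (fun n => ((a :: t).count n : Int) * pvVal n)).sum
        = (S.map (fun n => (t.count n : Int) * pvVal n +
            (if n = a then 1 else 0) * pvVal n)).sum := by
          congr 1; apply List.map_congr_left; intro n _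
          rw [List.count_cons]
          push_cast
          by_cases h : a = n
          · subst h; simp [add_mul]
          · have hb : (a == n) = false := beq_eq_false_iff_ne.mpr h
            have hn : n ≠ a := Ne.symm h
            simp [hb, hn]
      _ = (S.map (fun n => (t.count n : Int) * pvVal n)).sum +
            (S.map (fun n => ((if n = a then 1 else 0 : Int)) * pvVal n)).sum := by
          rw [← List.sum_map_add]
      _ = (t.map pvVal).sum + pvVal a := by rw [ih hsub', pv_indicator S hnd a ha]
      _ = ((a :: t).map pvVal).sum := by simp; ring

-- the two "highest card" computations agree
lemma pv_highest_eq (l : List String) (hpre : ∀ c ∈ l, c ∈ cardNames) :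
    (rankDesc.find? (fun n => l.contains n)).getD "" =
      (l.foldl pvStepMax ((0 : Int), "")).2 := by
  cases l with
  | nil => rfl
  | cons a t =>
    have ha := hpre a (by simp)
    obtain ⟨n, hn1, hn2, hn3⟩ :=
      pv_find_spec rankDesc pv_rank_sorted (a :: t)
        (fun x hx => pv_names_rank (hpre x hx)) (by simp)
    rw [hn1]
    -- A's fold: first step takes (pvPos a, a) since pvPos a > 0
    have hstep : (a :: t).foldl pvStepMax ((0 : Int), "") =
        t.foldl pvStepMax (pvPos a, a) := by
      simp only [List.foldl_cons, pvStepMax]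
      have := pv_pos_pos ha
      simp [this]
    rw [hstep]
    obtain ⟨h1, h2, h3, h4⟩ := pv_max_inv t (pvPos a) a rfl
    set r := t.foldl pvStepMax (pvPos a, a) with hr
    have hrmem : r.2 ∈ a :: t := by
      rcases h2 with h2 | h2
      · simp [h2]
      · simp [h2]
    have hup : pvPos r.2 ≤ pvPos n := hn3 r.2 hrmem
    have hdown : pvPos n ≤ pvPos r.2 := by
      have := hn2
      rcases List.mem_cons.mp hn2 with rfl | hx
      · omega
      · have := h4 n hx; omega
    exact pv_pos_inj (hpre n hn2) (hpre r.2 hrmem) (le_antisymm hdown hup)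

-- ===== VERDICT =====
theorem BlackjackHighest_spec : Claim_equal_BlackjackHighest := by
  intro strArr _hdom hpre
  unfold Spec_BlackjackHighest
  simp only [BlackjackHighest, BlackjackHighest_alt]
  rw [pv_fuse]
  rw [PySem.Dict.foldl_insert_getD_add_one_eq_counter]
  simp only [PySem.Dict.items_counter, PySem.Dict.contains_counter, List.map_map]
  have hsum : ((PySem.Set.ofList strArr).map
      ((fun p : String × Int => p.2 * pvVal p.1) ∘ fun k => (k, (strArr.count k : Int)))).sum =
      (strArr.map pvVal).sum := by
    have := pv_sum_counts (PySem.Set.ofList strArr) (PySem.Set.nodup_ofList strArr) strArr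
      (fun x hx => (PySem.Set.mem_ofList _ _).mpr hx)
    simpa [Function.comp] using this
  rw [hsum, pv_highest_eq strArr hpre]
  have hace : ∀ b : List String, (b.contains "ace") = decide ("ace" ∈ b) := by
    intro b; simp [List.contains_eq_mem]
  simp only [zero_add, hace, decide_eq_true_eq]
  split_ifs <;> simp_all
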